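-- pv_equiv track=rewrite | github.com/ThomaziBR/Forca_Python | Projeto_Forca_01.py | EnigmaF
-- ===== SOURCE A (Python) =====
-- def EnigmaF(palavrinha):
--     enigma = []
--
--     d = 0
--     for i in range(len(palavrinha)):
--         if palavrinha[i].isspace() == True:
--             enigma.append(' ')
--
--             d += 1
--         elif palavrinha[i] == '-':
--             enigma.append('-')
--
--             d += 1
--         else:
--             enigma.append('_')
--     return enigma, d
-- ===== SOURCE B (Python) =====
-- def EnigmaF(palavrinha):
--     # Sparse strategy: index the non-blank positions (spaces/dashes) in a dict,
--     # fill the mask by looking each position up with default '_', and take the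
--     # count d as the size of that index.
--     special = {i: (' ' if c.isspace() else '-')
--                for i, c in enumerate(palavrinha)
--                if c.isspace() or c == '-'}
--     enigma = [special.get(i, '_') for i in range(len(palavrinha))]
--     return enigma, len(special)
-- ===== Notes on version B (the rewrite author's own statement) =====
-- stated objective: alternative
-- what changed: Instead of A's single accumulator loop appending and counting inline, B builds a sparse dict indexing only the space/dash positions, fills the mask by positional lookup with default '_', and takes the count as the dict's size.
import Mathlib
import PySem

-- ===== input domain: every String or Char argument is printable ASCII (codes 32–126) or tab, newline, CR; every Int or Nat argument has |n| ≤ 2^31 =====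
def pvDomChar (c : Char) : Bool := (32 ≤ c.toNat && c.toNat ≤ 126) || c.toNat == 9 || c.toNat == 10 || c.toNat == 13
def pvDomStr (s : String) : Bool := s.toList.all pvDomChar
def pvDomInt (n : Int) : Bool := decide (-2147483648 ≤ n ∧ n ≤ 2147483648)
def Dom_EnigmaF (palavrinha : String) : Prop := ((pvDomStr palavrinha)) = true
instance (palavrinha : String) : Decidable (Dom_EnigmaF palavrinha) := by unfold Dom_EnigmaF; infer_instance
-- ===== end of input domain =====

-- B replaces A's inline append-and-count loop by a sparse dict of the space/dash positions,
-- a positional-lookup fill of the mask, and the dict's size as the count (alternative decomposition, same cost).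


-- ===== PORT A =====
-- A: for i in range(len(palavrinha)): classify palavrinha[i], append to enigma, bump d inline.
-- pyGetD's default ' ' is never used: i always lies in range (exact there).
def EnigmaF (palavrinha : String) : List String × Int :=
  (PySem.List.pyRange 0 (palavrinha.toList.length : Int) 1).foldl
    (fun (st : List String × Int) i =>
      let c := PySem.List.pyGetD palavrinha.toList i ' '
      if PySem.Chars.isspace c = true then (st.1 ++ [" "], st.2 + 1)
      else if c = '-' then (st.1 ++ ["-"], st.2 + 1)
      else (st.1 ++ ["_"], st.2))
    ([], 0)

-- ===== PORT B =====
-- B: dict comprehension indexing only the space/dash positions; mask = lookup with default '_';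
-- d = size of the dict.
def EnigmaF_alt (palavrinha : String) : List String × Int :=
  let special : PySem.Dict Int String :=
    ((PySem.List.enumerate palavrinha.toList).filter
        (fun ic => PySem.Chars.isspace ic.2 || ic.2 == '-')).foldl
      (fun d ic => d.insert ic.1 (if PySem.Chars.isspace ic.2 then " " else "-"))
      PySem.Dict.empty
  ((PySem.List.pyRange 0 (palavrinha.toList.length : Int) 1).map (fun i => special.getD i "_"),
   (special.size : Int))

-- ===== PRECONDITION & SPEC =====
def Spec_EnigmaF (palavrinha : String) (out : List String × Int) : Prop := out = EnigmaF_alt palavrinha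
instance (palavrinha : String) (out : List String × Int) : Decidable (Spec_EnigmaF palavrinha out) := by unfold Spec_EnigmaF; infer_instance

-- ===== CLAIM (what is proved, stated in full; the proofs are below) =====
def Claim_equal_EnigmaF : Prop := ∀ (palavrinha : String), Dom_EnigmaF palavrinha → Spec_EnigmaF palavrinha (EnigmaF palavrinha)

-- ===== LEMMAS AND PROOFS =====

-- shared vocabulary for the proofs
def pvSp (c : Char) : Bool := PySem.Chars.isspace c || c == '-'
def pvMask (c : Char) : String := if PySem.Chars.isspace c then " " else if c = '-' then "-" else "_"
def pvRepl (c : Char) : String := if PySem.Chars.isspace c then " " else "-"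

-- A's loop, closed form
theorem EnigmaF_loop (l : List Char) (acc : List String) (d : Int) :
    l.foldl
      (fun (st : List String × Int) c =>
        if PySem.Chars.isspace c = true then (st.1 ++ [" "], st.2 + 1)
        else if c = '-' then (st.1 ++ ["-"], st.2 + 1)
        else (st.1 ++ ["_"], st.2))
      (acc, d)
    = (acc ++ l.map pvMask, d + (l.countP pvSp : Int)) := by
  induction l generalizing acc d with
  | nil => simp
  | cons c t ih =>
    simp only [List.foldl_cons, List.map_cons, List.countP_cons]
    by_cases hs : PySem.Chars.isspace c = true
    · rw [if_pos hs, ih]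
      simp [pvMask, pvSp, hs]
      omega
    · rw [if_neg hs]
      by_cases hd : c = '-'
      · subst hd
        rw [if_pos rfl, ih]
        have h2 : PySem.Chars.isspace '-' = false := by decide
        simp [pvMask, pvSp, h2]
        omega
      · rw [if_neg hd, ih]
        simp [pvMask, pvSp, eq_false_of_ne_true hs, hd]

theorem EnigmaF_closed (p : String) :
    EnigmaF p = (p.toList.map pvMask, (p.toList.countP pvSp : Int)) := by
  unfold EnigmaF
  rw [PySem.List.foldl_pyRange_zero_pyGetD' p.toList ' '
      (fun (st : List String × Int) c =>
        if PySem.Chars.isspace c = true then (st.1 ++ [" "], st.2 + 1)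
        else if c = '-' then (st.1 ++ ["-"], st.2 + 1)
        else (st.1 ++ ["_"], st.2)) ([], 0)]
  rw [EnigmaF_loop]
  simp

-- B's dict: items are exactly the special positions, in order
theorem special_fst_nodup (l : List Char) :
    (((PySem.List.enumerate l).filter (fun ic => pvSp ic.2)).map (fun ic => ic.1)).Nodup := by
  have h := PySem.List.pairwise_lt_enumerate l 0
  have h2 := h.filter (fun ic => pvSp ic.2)
  have h3 := h2.map (fun ic : Int × Char => ic.1) (fun a b hab => hab)
  exact h3.imp (fun {a b} hab => ne_of_lt hab)

theorem special_items (l : List Char) :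
    (((PySem.List.enumerate l).filter (fun ic => pvSp ic.2)).foldl
      (fun d ic => d.insert ic.1 (if PySem.Chars.isspace ic.2 then " " else "-"))
      (PySem.Dict.empty : PySem.Dict Int String)).items
    = ((PySem.List.enumerate l).filter (fun ic => pvSp ic.2)).map (fun ic => (ic.1, pvRepl ic.2)) := by
  rw [PySem.Dict.items_foldl_insert_fresh]
  · simp [pvRepl, PySem.Dict.empty]
  · intro a _; simp [PySem.Dict.contains_empty]
  · exact special_fst_nodup l

theorem special_getD (l : List Char) (k : Nat) (hk : k < l.length) :
    (((PySem.List.enumerate l).filter (fun ic => pvSp ic.2)).foldl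
      (fun d ic => d.insert ic.1 (if PySem.Chars.isspace ic.2 then " " else "-"))
      (PySem.Dict.empty : PySem.Dict Int String)).getD (k : Int) "_" = pvMask l[k] := by
  set D := ((PySem.List.enumerate l).filter (fun ic => pvSp ic.2)).foldl
      (fun d ic => d.insert ic.1 (if PySem.Chars.isspace ic.2 then " " else "-"))
      (PySem.Dict.empty : PySem.Dict Int String) with hD
  have hkeys : D.keys = ((PySem.List.enumerate l).filter (fun ic => pvSp ic.2)).map (fun ic => ic.1) := by
    rw [PySem.Dict.keys, hD, special_items, List.map_map]
    rfl
  have hnodup : D.keys.Nodup := by rw [hkeys]; exact special_fst_nodup l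
  by_cases hs : pvSp l[k] = true
  · have hmem : ((k : Int), pvRepl l[k]) ∈ D.items := by
      rw [special_items]
      refine List.mem_map.2 ⟨((k : Int), l[k]), ?_, rfl⟩
      refine List.mem_filter.2 ⟨?_, hs⟩
      exact (PySem.List.mem_enumerate_iff _ _ _).2 ⟨k, hk, by simp⟩
    rw [PySem.Dict.getD_of_mem_items _ hmem hnodup]
    unfold pvSp at hs
    unfold pvRepl pvMask
    by_cases hi : PySem.Chars.isspace l[k] = true
    · simp [hi]
    · simp only [hi, Bool.false_eq_true] at hs ⊢
      simp only [Bool.false_or, beq_iff_eq] at hs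
      simp [hs]
  · have hnk : (k : Int) ∉ D.keys := by
      rw [hkeys]
      intro hmem
      obtain ⟨ic, hicmem, hfst⟩ := List.mem_map.1 hmem
      have := List.mem_filter.1 hicmem
      obtain ⟨k', hk', hic⟩ := (PySem.List.mem_enumerate_iff _ _ _).1 this.1
      have hkk : k' = k := by
        have : ((k' : Int)) = (k : Int) := by
          rw [hic] at hfst; simpa using hfst
        exact_mod_cast this
      subst hkk
      rw [hic] at this
      exact hs this.2
    have hget : D.get? (k : Int) = none := (PySem.Dict.get?_eq_none_iff_not_mem_keys D (k : Int)).2 hnk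
    rw [PySem.Dict.getD_of_get?_eq_none D "_" hget]
    unfold pvSp at hs
    unfold pvMask
    simp only [Bool.or_eq_true, not_or, Bool.not_eq_true] at hs
    simp [hs.1, show l[k] ≠ '-' by simpa using hs.2]

theorem EnigmaF_alt_closed (p : String) :
    EnigmaF_alt p = (p.toList.map pvMask, (p.toList.countP pvSp : Int)) := by
  unfold EnigmaF_alt
  rw [show (fun ic : Int × Char => PySem.Chars.isspace ic.2 || ic.2 == '-') = (fun ic => pvSp ic.2) from rfl]
  simp only [Prod.mk.injEq]
  constructor
  case _ =>
    -- the mask component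
    apply List.ext_getElem
    · simp [PySem.List.length_pyRange_one]
    · intro k h1 h2
      have hk : k < p.toList.length := by
        simpa [PySem.List.length_pyRange_one] using h1
      simp only [List.getElem_map, PySem.List.getElem_pyRange_one]
      rw [show ((0 : Int) + (k : Int)) = (k : Int) by ring]
      exact special_getD p.toList k hk
  case _ =>
    -- the count component
    have : (((PySem.List.enumerate p.toList).filter (fun ic => pvSp ic.2)).foldl
        (fun d ic => d.insert ic.1 (if PySem.Chars.isspace ic.2 then " " else "-"))
        (PySem.Dict.empty : PySem.Dict Int String)).size
        = p.toList.countP pvSp := by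
      simp only [PySem.Dict.size, special_items, List.length_map,
        ← List.countP_eq_length_filter]
      have hsnd := PySem.List.map_snd_enumerate p.toList 0
      calc ((PySem.List.enumerate p.toList).countP (fun ic => pvSp ic.2))
          = (((PySem.List.enumerate p.toList).map Prod.snd).countP pvSp) := by
            rw [List.countP_map]; rfl
        _ = p.toList.countP pvSp := by rw [hsnd]
    rw [this]

-- ===== VERDICT (by name: the statement is the Claim_ definition above) =====
theorem EnigmaF_spec : Claim_equal_EnigmaF := by
  intro p _
  unfold Spec_EnigmaF
  rw [EnigmaF_closed, EnigmaF_alt_closed]
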